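-- pv_equiv track=rewrite | github.com/chopper6/NUDGE | src/robustness.py | min_hitting_set_size
-- ===== SOURCE A (Python) =====
-- import itertools, sys
--
-- def min_hitting_set_size(set_of_sets):
-- 	family = [set(s) for s in set_of_sets]
-- 	if not family:
-- 		return 0
-- 	universe = sorted(set().union(*family))
-- 	if not universe:
-- 		return 0
--
-- 	for k in range(len(universe) + 1):
-- 		for chosen in itertools.combinations(universe, k):
-- 			chosen_set = set(chosen)
-- 			if all(chosen_set & s for s in family):
-- 				return k
-- ===== SOURCE B (Python) =====
-- def min_hitting_set_size(set_of_sets):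
-- 	family = [set(s) for s in set_of_sets]
-- 	if not family:
-- 		return 0
-- 	universe = set().union(*family)
-- 	if not universe:
-- 		return 0
--
-- 	def solve(chosen, size):
-- 		unhit = next((s for s in family if chosen.isdisjoint(s)), None)
-- 		if unhit is None:
-- 			return size
-- 		return min(solve(chosen | {x}, size + 1) for x in unhit)
--
-- 	return solve(set(), 0)
-- ===== Notes on version B (the rewrite author's own statement) =====
-- stated objective: alternative
-- what changed: Replaces A's enumeration of all k-combinations of the universe for growing k with a recursive branch-and-bound that repeatedly picks the first family set not yet hit and branches on its elements, taking the minimum branch size.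
-- outside the precondition, e.g. on min_hitting_set_size([[], [1]]): A returns None, B raises ValueError
import Mathlib
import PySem

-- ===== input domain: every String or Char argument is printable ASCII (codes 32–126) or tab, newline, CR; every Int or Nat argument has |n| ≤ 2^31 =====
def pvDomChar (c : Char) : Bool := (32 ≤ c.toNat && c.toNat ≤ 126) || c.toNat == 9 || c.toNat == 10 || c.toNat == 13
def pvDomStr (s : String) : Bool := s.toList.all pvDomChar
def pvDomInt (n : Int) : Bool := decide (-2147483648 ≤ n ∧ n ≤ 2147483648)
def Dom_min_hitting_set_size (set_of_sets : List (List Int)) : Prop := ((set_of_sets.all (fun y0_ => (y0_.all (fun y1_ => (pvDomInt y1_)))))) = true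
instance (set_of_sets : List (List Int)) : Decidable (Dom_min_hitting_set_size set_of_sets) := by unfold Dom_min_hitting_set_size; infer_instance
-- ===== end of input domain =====

-- B replaces A's k-combinations enumeration by a recursive branch-and-bound on the first unhit set (alternative algorithm, similar cost).


-- ===== PORT A =====
-- 'for k in range(len(universe)+1): for chosen in combinations(universe,k): if all(chosen_set & s for s in family): return k'
-- (only k is returned, so the inner combination loop is an 'any'); fall-through (no hitting set) gives none.
def pvALoop (family : List (PySem.Set Int)) (univ : List Int) : List Nat → Option Int
  | [] => none
  | k :: ks =>
      if (PySem.List.combinations univ k).any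
           (fun chosen => family.all (fun s => !(PySem.Set.inter (PySem.Set.ofList chosen) s).isEmpty)) then
        some (k : Int)
      else pvALoop family univ ks

def min_hitting_set_size (set_of_sets : List (List Int)) : Int :=
  let family := set_of_sets.map (fun s => PySem.Set.ofList s)
  if family = [] then 0
  else
    let univ := PySem.List.sorted (family.foldl (fun a s => PySem.Set.union a s) PySem.Set.empty) (fun x => x) false
    if univ = [] then 0
    else (pvALoop family univ (List.range (univ.length + 1))).getD 0

-- ===== PORT B =====
-- min over a generator of ints, as a fold (Python's min over a nonempty collection of ints)
def pvOMin : Option Int → Option Int → Option Int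
  | none, b => b
  | some a, none => some a
  | some a, some b => some (min a b)

-- 'solve(chosen, size)': first family set disjoint from chosen; none → size; else branch on its elements.
-- fuel only makes the recursion structural; it never runs out for fuel > |universe| - |chosen|.
def pvBSolve (family : List (PySem.Set Int)) (chosen : PySem.Set Int) (size : Int) : Nat → Option Int
  | 0 =>
    match family.find? (fun s => PySem.Set.isdisjoint chosen s) with
    | none => some size
    | some _ => none
  | fuel + 1 =>
    match family.find? (fun s => PySem.Set.isdisjoint chosen s) with
    | none => some size
    | some unhit =>
        (unhit.map (fun x => pvBSolve family (PySem.Set.add chosen x) (size + 1) fuel)).foldl pvOMin none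

def min_hitting_set_size_alt (set_of_sets : List (List Int)) : Int :=
  let family := set_of_sets.map (fun s => PySem.Set.ofList s)
  if family = [] then 0
  else
    let univ := family.foldl (fun a s => PySem.Set.union a s) PySem.Set.empty
    if univ = [] then 0
    else (pvBSolve family PySem.Set.empty 0 (univ.length + 1)).getD 0

-- ===== PRECONDITION & SPEC =====
-- Pre_ excludes families mixing an empty set with a nonempty one: no hitting set exists, A's loop
-- falls through and returns None (not an int); B raises ValueError there (min of an empty generator).
def Pre_min_hitting_set_size (set_of_sets : List (List Int)) : Prop :=
  [] ∈ set_of_sets → ∀ s ∈ set_of_sets, s = []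
instance (set_of_sets : List (List Int)) : Decidable (Pre_min_hitting_set_size set_of_sets) := by
  unfold Pre_min_hitting_set_size; infer_instance

def pvWitness_min_hitting_set_size : List (List Int) := [[1, 2], [2, 3]]

def Spec_min_hitting_set_size (set_of_sets : List (List Int)) (out : Int) : Prop := out = min_hitting_set_size_alt set_of_sets
instance (set_of_sets : List (List Int)) (out : Int) : Decidable (Spec_min_hitting_set_size set_of_sets out) := by unfold Spec_min_hitting_set_size; infer_instance

-- ===== CLAIM (what is proved, stated in full; the proofs are below) =====
def Claim_equal_min_hitting_set_size : Prop := ∀ (set_of_sets : List (List Int)), Dom_min_hitting_set_size set_of_sets → Pre_min_hitting_set_size set_of_sets → Spec_min_hitting_set_size set_of_sets (min_hitting_set_size set_of_sets)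

-- ===== LEMMAS AND PROOFS =====

-- 'c hits every set of the family'
def pvHits (F : List (PySem.Set Int)) (c : List Int) : Prop := ∀ s ∈ F, ∃ x, x ∈ c ∧ x ∈ s

-- e is an admissible extension of chosen: fresh elements of U making chosen ++ e a hitting set
def pvE (F : List (PySem.Set Int)) (U chosen e : List Int) : Prop :=
  e.Nodup ∧ (∀ x ∈ e, x ∈ U ∧ x ∉ chosen) ∧ pvHits F (chosen ++ e)

-- minimal number of further elements needed
noncomputable def pvM (F : List (PySem.Set Int)) (U chosen : List Int) : Nat :=
  sInf {m | ∃ e, pvE F U chosen e ∧ e.length = m}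

lemma pvHits_congr {F : List (PySem.Set Int)} {c d : List Int}
    (h : ∀ x, x ∈ c ↔ x ∈ d) (hc : pvHits F c) : pvHits F d := by
  intro s hs
  obtain ⟨x, hxc, hxs⟩ := hc s hs
  exact ⟨x, (h x).mp hxc, hxs⟩

lemma pvM_set_nonempty {F : List (PySem.Set Int)} {U : List Int}
    (hF : ∀ s ∈ F, s ≠ []) (hcov : ∀ s ∈ F, ∀ x ∈ s, x ∈ U) (hU : U.Nodup)
    (chosen : List Int) :
    {m | ∃ e, pvE F U chosen e ∧ e.length = m}.Nonempty := by
  refine ⟨(U.filter (fun x => !decide (x ∈ chosen))).length,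
    U.filter (fun x => !decide (x ∈ chosen)), ⟨hU.filter _, ?_, ?_⟩, rfl⟩
  · intro x hx
    simp only [List.mem_filter, Bool.not_eq_eq_eq_not, Bool.not_true, decide_eq_false_iff_not] at hx
    exact hx
  · intro s hs
    obtain ⟨y, hy⟩ := List.exists_mem_of_ne_nil s (hF s hs)
    refine ⟨y, ?_, hy⟩
    by_cases hyc : y ∈ chosen
    · exact List.mem_append_left _ hyc
    · refine List.mem_append_right _ ?_
      simp only [List.mem_filter, Bool.not_eq_eq_eq_not, Bool.not_true, decide_eq_false_iff_not]
      exact ⟨hcov s hs y hy, hyc⟩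

lemma pvM_attained {F : List (PySem.Set Int)} {U : List Int}
    (hF : ∀ s ∈ F, s ≠ []) (hcov : ∀ s ∈ F, ∀ x ∈ s, x ∈ U) (hU : U.Nodup)
    (chosen : List Int) :
    ∃ e, pvE F U chosen e ∧ e.length = pvM F U chosen := by
  have h := Nat.sInf_mem (pvM_set_nonempty hF hcov hU chosen)
  obtain ⟨e, he, hl⟩ := h
  exact ⟨e, he, hl⟩

lemma pvM_le {F : List (PySem.Set Int)} {U chosen e : List Int}
    (he : pvE F U chosen e) : pvM F U chosen ≤ e.length :=
  Nat.sInf_le ⟨e, he, rfl⟩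

-- if chosen already hits everything, no extension is needed
lemma pvM_zero_of_hits {F : List (PySem.Set Int)} {U chosen : List Int}
    (h : pvHits F chosen) : pvM F U chosen = 0 :=
  Nat.le_zero.mp (pvM_le ⟨List.nodup_nil, by simp, pvHits_congr (by simp) h⟩)

-- adding any fresh x can save at most one element
lemma pvM_le_succ {F : List (PySem.Set Int)} {U : List Int}
    (hF : ∀ s ∈ F, s ≠ []) (hcov : ∀ s ∈ F, ∀ x ∈ s, x ∈ U) (hU : U.Nodup)
    {chosen : List Int} {x : Int}
    (hxU : x ∈ U) (hxc : x ∉ chosen) :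
    pvM F U chosen ≤ pvM F U (chosen ++ [x]) + 1 := by
  obtain ⟨e, ⟨hnd, hmem, hhit⟩, hlen⟩ := pvM_attained hF hcov hU (chosen ++ [x])
  have hxe : x ∉ e := fun hx => by simpa using (hmem x hx).2
  have : pvE F U chosen (x :: e) := by
    refine ⟨List.nodup_cons.mpr ⟨hxe, hnd⟩, ?_, ?_⟩
    · intro y hy
      rcases List.mem_cons.mp hy with rfl | hy
      · exact ⟨hxU, hxc⟩
      · exact ⟨(hmem y hy).1, fun hc => (hmem y hy).2 (List.mem_append_left _ hc)⟩
    · refine pvHits_congr (fun y => ?_) hhit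
      simp [List.mem_append, List.mem_cons]
  calc pvM F U chosen ≤ (x :: e).length := pvM_le this
    _ = pvM F U (chosen ++ [x]) + 1 := by simp [hlen]

-- exchange: some element of the first unhit set saves one
lemma pvM_branch_le {F : List (PySem.Set Int)} {U : List Int} {chosen : List Int}
    {s : PySem.Set Int}
    (hF : ∀ t ∈ F, t ≠ []) (hcov : ∀ t ∈ F, ∀ x ∈ t, x ∈ U) (hU : U.Nodup)
    (hs : s ∈ F) (hdisj : ∀ x ∈ chosen, x ∉ s) :
    ∃ x ∈ s, x ∉ chosen ∧ pvM F U (chosen ++ [x]) + 1 ≤ pvM F U chosen := by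
  obtain ⟨e, ⟨hnd, hmem, hhit⟩, hlen⟩ := pvM_attained hF hcov hU chosen
  obtain ⟨y, hyce, hys⟩ := hhit s hs
  have hyc : y ∉ chosen := fun hc => hdisj y hc hys
  have hye : y ∈ e := by
    rcases List.mem_append.mp hyce with hc | he
    · exact absurd hc hyc
    · exact he
  refine ⟨y, hys, hyc, ?_⟩
  have he' : pvE F U (chosen ++ [y]) (e.erase y) := by
    refine ⟨hnd.erase y, ?_, ?_⟩
    · intro z hz
      have hze : z ∈ e := List.mem_of_mem_erase hz
      refine ⟨(hmem z hze).1, fun hc => ?_⟩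
      rcases List.mem_append.mp hc with hc | hc
      · exact (hmem z hze).2 hc
      · have : z = y := by simpa using hc
        subst this
        exact (List.Nodup.not_mem_erase hnd) hz
    · refine pvHits_congr (fun z => ?_) hhit
      have hperm : e.Perm (y :: e.erase y) := List.perm_cons_erase hye
      constructor
      · intro hz
        rcases List.mem_append.mp hz with hc | hc
        · simp [List.mem_append, hc]
        · have := hperm.mem_iff.mp hc
          rcases List.mem_cons.mp this with rfl | hc'
          · simp [List.mem_append]
          · simp [List.mem_append, hc']
      · intro hz
        rcases List.mem_append.mp hz with hc | hc
        · rcases List.mem_append.mp hc with hc' | hc'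
          · exact List.mem_append_left _ hc'
          · have : z = y := by simpa using hc'
            subst this
            exact List.mem_append_right _ hye
        · exact List.mem_append_right _ (List.mem_of_mem_erase hc)
  have h1 : pvM F U (chosen ++ [y]) ≤ (e.erase y).length := pvM_le he'
  have h2 : (e.erase y).length + 1 = e.length := by
    rw [List.length_erase_of_mem hye]
    exact Nat.succ_pred_eq_of_pos (List.length_pos_of_mem hye)
  omega

-- the option-min fold over a nonempty list of 'some' values
lemma pvFold_min_acc (l : List Int) (g : Int → Int) (a : Int) :
    ∃ v, (l.map (fun x => some (g x))).foldl pvOMin (some a) = some v ∧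
      (v = a ∨ ∃ x ∈ l, v = g x) ∧ v ≤ a ∧ ∀ x ∈ l, v ≤ g x := by
  induction l generalizing a with
  | nil => exact ⟨a, rfl, Or.inl rfl, le_refl a, by simp⟩
  | cons x xs ih =>
    obtain ⟨v, hv, hor, hle, hall⟩ := ih (min a (g x))
    refine ⟨v, by simpa [pvOMin] using hv, ?_, ?_, ?_⟩
    · rcases hor with h | ⟨z, hz, h⟩
      · rcases le_total a (g x) with hax | hax
        · exact Or.inl (by omega)
        · exact Or.inr ⟨x, List.mem_cons_self, by omega⟩
      · exact Or.inr ⟨z, List.mem_cons_of_mem _ hz, h⟩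
    · exact le_trans hle (min_le_left _ _)
    · intro z hz
      rcases List.mem_cons.mp hz with rfl | hz
      · exact le_trans hle (min_le_right _ _)
      · exact hall z hz

lemma pvFold_min (l : List Int) (g : Int → Int) (hne : l ≠ []) :
    ∃ v, (l.map (fun x => some (g x))).foldl pvOMin none = some v ∧
      (∃ x ∈ l, v = g x) ∧ ∀ x ∈ l, v ≤ g x := by
  cases l with
  | nil => exact absurd rfl hne
  | cons x xs =>
    obtain ⟨v, hv, hor, hle, hall⟩ := pvFold_min_acc xs g (g x)
    refine ⟨v, by simpa [pvOMin] using hv, ?_, ?_⟩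
    · rcases hor with h | ⟨z, hz, h⟩
      · exact ⟨x, List.mem_cons_self, h⟩
      · exact ⟨z, List.mem_cons_of_mem _ hz, h⟩
    · intro z hz
      rcases List.mem_cons.mp hz with rfl | hz
      · exact hle
      · exact hall z hz

-- branch-and-bound computes size + pvM
lemma pvBSolve_eq {F : List (PySem.Set Int)} {U : List Int}
    (hF : ∀ s ∈ F, s ≠ []) (hcov : ∀ s ∈ F, ∀ x ∈ s, x ∈ U) (hU : U.Nodup) :
    ∀ (fuel : Nat) (chosen : List Int) (size : Int), chosen.Nodup → (∀ x ∈ chosen, x ∈ U) →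
      U.length - chosen.length < fuel →
      pvBSolve F chosen size fuel = some (size + (pvM F U chosen : Int)) := by
  intro fuel
  induction fuel with
  | zero => intro chosen size _ _ hb; omega
  | succ fuel ih =>
    intro chosen size hnd hsub hb
    rcases hfind : F.find? (fun s => PySem.Set.isdisjoint chosen s) with _ | unhit
    · -- every set is already hit
      have hhit : pvHits F chosen := by
        intro s hs
        have hns := List.find?_eq_none.mp hfind s hs
        simp only [PySem.Set.isdisjoint_iff] at hns
        push Not at hns
        obtain ⟨x, hxc, hxs⟩ := hns
        exact ⟨x, hxc, hxs⟩
      simp [pvBSolve, hfind, pvM_zero_of_hits hhit]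
    · have hmemF : unhit ∈ F := List.mem_of_find?_eq_some hfind
      have hdisj : ∀ x ∈ chosen, x ∉ unhit := by
        have := List.find?_some hfind
        simpa only [PySem.Set.isdisjoint_iff] using this
      have hne : unhit ≠ [] := hF unhit hmemF
      have hfresh : ∀ x ∈ unhit, x ∉ chosen := fun x hx hc => hdisj x hc hx
      have hmap : unhit.map (fun x => pvBSolve F (PySem.Set.add chosen x) (size + 1) fuel)
          = unhit.map (fun x => some ((size + 1) + (pvM F U (chosen ++ [x]) : Int))) := by
        refine List.map_congr_left (fun x hx => ?_)
        have hxc : x ∉ chosen := hfresh x hx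
        have hxU : x ∈ U := hcov unhit hmemF x hx
        rw [PySem.Set.add_of_not_mem hxc]
        have hnd' : (chosen ++ [x]).Nodup := by
          simp [List.nodup_append]
          exact ⟨hnd, fun a ha hax => hxc (hax ▸ ha)⟩
        have hsub' : ∀ y ∈ chosen ++ [x], y ∈ U := by
          intro y hy
          rcases List.mem_append.mp hy with hy | hy
          · exact hsub y hy
          · have : y = x := by simpa using hy
            exact this ▸ hxU
        have hlen' : (chosen ++ [x]).length ≤ U.length :=
          (List.subperm_of_subset hnd' hsub').length_le
        have hb' : U.length - (chosen ++ [x]).length < fuel := by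
          simp only [List.length_append, List.length_cons, List.length_nil] at hlen' ⊢
          omega
        exact ih (chosen ++ [x]) (size + 1) hnd' hsub' hb'
      obtain ⟨v, hv, ⟨x0, hx0, hvx0⟩, hvall⟩ :=
        pvFold_min unhit (fun x => (size + 1) + (pvM F U (chosen ++ [x]) : Int)) hne
      have hge : size + (pvM F U chosen : Int) ≤ v := by
        have := pvM_le_succ hF hcov hU (hcov unhit hmemF x0 hx0) (hfresh x0 hx0)
          (chosen := chosen) (x := x0)
        rw [hvx0]
        omega
      have hle : v ≤ size + (pvM F U chosen : Int) := by
        obtain ⟨y, hy, _, hsave⟩ := pvM_branch_le hF hcov hU hmemF hdisj (chosen := chosen)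
        have := hvall y hy
        push_cast at this ⊢
        omega
      have hveq : v = size + (pvM F U chosen : Int) := le_antisymm hle hge
      simp only [pvBSolve, hfind, hmap, hv, hveq]

-- A's loop is find? over the k list
lemma pvALoop_eq_find (F : List (PySem.Set Int)) (U : List Int) (ll : List Nat) :
    pvALoop F U ll = (ll.find? (fun k => (PySem.List.combinations U k).any
      (fun chosen => F.all (fun s => !(PySem.Set.inter (PySem.Set.ofList chosen) s).isEmpty)))).map
      (fun k => (k : Int)) := by
  induction ll with
  | nil => rfl
  | cons k ks ih =>
    by_cases h : (PySem.List.combinations U k).any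
        (fun chosen => F.all (fun s => !(PySem.Set.inter (PySem.Set.ofList chosen) s).isEmpty)) = true
    · simp [pvALoop, List.find?, h]
    · simp only [Bool.not_eq_true] at h
      simp [pvALoop, List.find?, h, ih]

lemma pvInterNe (c : List Int) (s : PySem.Set Int) :
    ¬(PySem.Set.ofList c).inter s = [] ↔ ∃ x, x ∈ c ∧ x ∈ s := by
  constructor
  · intro h
    obtain ⟨x, hx⟩ := List.exists_mem_of_ne_nil _ h
    have := (PySem.Set.mem_inter _ _ _).mp hx
    exact ⟨x, (PySem.Set.mem_ofList _ _).mp this.1, this.2⟩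
  · rintro ⟨x, hxl, hxs⟩ h
    have : x ∈ (PySem.Set.ofList c).inter s :=
      (PySem.Set.mem_inter _ _ _).mpr ⟨(PySem.Set.mem_ofList _ _).mpr hxl, hxs⟩
    simp [h] at this

lemma pvInner_iff (F : List (PySem.Set Int)) (c : List Int) :
    (F.all (fun s => !(PySem.Set.inter (PySem.Set.ofList c) s).isEmpty)) = true ↔ pvHits F c := by
  simp only [List.all_eq_true, Bool.not_eq_eq_eq_not, Bool.not_true, List.isEmpty_eq_false_iff,
    ne_eq, pvHits]
  exact forall₂_congr (fun s hs => pvInterNe c s)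

-- the combination check tests exactly 'some length-k sublist of U hits'
lemma pvChk_iff (F : List (PySem.Set Int)) (U : List Int) (k : Nat) :
    ((PySem.List.combinations U k).any
      (fun chosen => F.all (fun s => !(PySem.Set.inter (PySem.Set.ofList chosen) s).isEmpty))) = true ↔
    ∃ c, c.Sublist U ∧ c.length = k ∧ pvHits F c := by
  rw [List.any_eq_true]
  constructor
  · rintro ⟨c, hc, hall⟩
    obtain ⟨hsl, hlen⟩ := (PySem.List.mem_combinations_iff U k c).mp hc
    exact ⟨c, hsl, hlen, (pvInner_iff F c).mp hall⟩
  · rintro ⟨c, hsl, hlen, hhit⟩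
    exact ⟨c, (PySem.List.mem_combinations_iff U k c).mpr ⟨hsl, hlen⟩, (pvInner_iff F c).mpr hhit⟩

lemma pvFind_range' : ∀ (len a m : Nat) (p : Nat → Bool), a ≤ m → m < a + len → p m = true →
    (∀ j, a ≤ j → j < m → p j = false) → (List.range' a len).find? p = some m := by
  intro len
  induction len with
  | zero => intro a m p ha hm _ _; omega
  | succ len ih =>
    intro a m p ha hm hp hmin
    by_cases ham : a = m
    · subst ham
      simp [List.range', hp]
    · have hpa : p a = false := hmin a le_rfl (lt_of_le_of_ne ha ham)
      simp only [List.range', List.find?, hpa]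
      exact ih (a + 1) m p (by omega) (by omega) hp (fun j hj hjm => hmin j (by omega) hjm)

-- find? over range returns the least index satisfying the predicate
lemma pvFind_range (n m : Nat) (p : Nat → Bool) (hm : m < n) (hp : p m = true)
    (hmin : ∀ j < m, p j = false) : (List.range n).find? p = some m := by
  rw [List.range_eq_range']
  exact pvFind_range' n 0 m p (Nat.zero_le m) (by omega) hp (fun j _ hj => hmin j hj)

-- ===== VERDICT (by name: the statement is the Claim_ definition above) =====
lemma pvMem_foldl_union :
    ∀ (L : List (PySem.Set Int)) (a : PySem.Set Int) (x : Int),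
      x ∈ L.foldl (fun a s => PySem.Set.union a s) a ↔ x ∈ a ∨ ∃ s ∈ L, x ∈ s := by
  intro L
  induction L with
  | nil => simp
  | cons t L ih =>
    intro a x
    simp only [List.foldl_cons, ih, PySem.Set.mem_union, List.mem_cons]
    constructor
    · rintro (⟨h | h⟩ | ⟨s, hs, h⟩)
      · exact Or.inl h
      · exact Or.inr ⟨t, Or.inl rfl, h⟩
      · exact Or.inr ⟨s, Or.inr hs, h⟩
    · rintro (h | ⟨s, rfl | hs, h⟩)
      · exact Or.inl (Or.inl h)
      · exact Or.inl (Or.inr h)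
      · exact Or.inr ⟨s, hs, h⟩

lemma pvNodup_foldl_union :
    ∀ (L : List (PySem.Set Int)) (a : PySem.Set Int), a.Nodup →
      (L.foldl (fun a s => PySem.Set.union a s) a).Nodup := by
  intro L
  induction L with
  | nil => intro a h; exact h
  | cons t L ih => intro a h; exact ih _ (PySem.Set.nodup_union a t h)

theorem min_hitting_set_size_spec : Claim_equal_min_hitting_set_size := by
  intro sos _ hpre
  unfold Spec_min_hitting_set_size min_hitting_set_size min_hitting_set_size_alt
  cases sos with
  | nil => simp
  | cons l0 ls =>
    set F := (l0 :: ls).map (fun s => PySem.Set.ofList s) with hFdef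
    have hFne : F ≠ [] := by simp [hFdef]
    simp only [if_neg hFne]
    set V := F.foldl (fun a s => PySem.Set.union a s) PySem.Set.empty with hVdef
    set U := PySem.List.sorted V (fun x => x) false with hUdef
    by_cases hV : V = []
    · have hU : U = [] := by rw [hUdef, hV]; rfl
      simp [hU, hV]
    · have hU : U ≠ [] := fun h => hV ((PySem.List.sorted_eq_nil_iff V (fun x => x) false).mp h)
      simp only [if_neg hU, if_neg hV]
      have hperm : U.Perm V := PySem.List.sorted_perm V (fun x => x) false
      have hVmem : ∀ x, x ∈ V ↔ ∃ s ∈ F, x ∈ s := by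
        intro x
        rw [hVdef, pvMem_foldl_union]
        simp [PySem.Set.empty]
      have hUmem : ∀ x, x ∈ U ↔ ∃ s ∈ F, x ∈ s := fun x => (hperm.mem_iff).trans (hVmem x)
      have hUnodup : U.Nodup := hperm.nodup_iff.mpr (pvNodup_foldl_union F _ List.nodup_nil)
      have hUlen : U.length = V.length := hperm.length_eq
      have hcov : ∀ s ∈ F, ∀ x ∈ s, x ∈ U := fun s hs x hx => (hUmem x).mpr ⟨s, hs, hx⟩
      -- no member of the family is empty
      have hFne' : ∀ s ∈ F, s ≠ [] := by
        intro s hs hsnil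
        obtain ⟨l, hl, rfl⟩ := List.mem_map.mp hs
        have hlnil : l = [] := by
          cases l with
          | nil => rfl
          | cons y t =>
            exact absurd hsnil (by
              intro h
              have : y ∈ PySem.Set.ofList (y :: t) :=
                (PySem.Set.mem_ofList _ _).mpr (List.mem_cons_self)
              simp [h] at this)
        obtain ⟨x, hxV⟩ := List.exists_mem_of_ne_nil V hV
        obtain ⟨s', hs', hxs'⟩ := (hVmem x).mp hxV
        obtain ⟨l', hl', rfl⟩ := List.mem_map.mp hs'
        have hl'nil : l' = [] := hpre (hlnil ▸ hl) l' hl'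
        subst hl'nil
        simp [PySem.Set.ofList] at hxs'
      -- the common optimum
      set m := pvM F U [] with hmdef
      -- B side
      have hB : pvBSolve F PySem.Set.empty 0 (V.length + 1) = some ((m : Int)) := by
        have := pvBSolve_eq hFne' hcov hUnodup (V.length + 1) PySem.Set.empty 0
          List.nodup_nil (by simp [PySem.Set.empty]) (by simp [PySem.Set.empty, hUlen])
        simpa using this
      -- A side: the check holds at m and fails below m
      have hchk : ((PySem.List.combinations U m).any
          (fun chosen => F.all (fun s => !(PySem.Set.inter (PySem.Set.ofList chosen) s).isEmpty))) = true ∧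
          m ≤ U.length := by
        obtain ⟨e, ⟨hnd, hmem, hhit⟩, hlen⟩ := pvM_attained hFne' hcov hUnodup []
        have hesub : ∀ x ∈ e, x ∈ U := fun x hx => (hmem x hx).1
        have hhit' : pvHits F e := by simpa using hhit
        set c := U.filter (fun x => decide (x ∈ e)) with hcdef
        have hcsub : c.Sublist U := List.filter_sublist
        have hcnodup : c.Nodup := hUnodup.filter _
        have hcmem : ∀ x, x ∈ c ↔ x ∈ e := by
          intro x
          simp only [hcdef, List.mem_filter, decide_eq_true_eq]
          exact ⟨fun h => h.2, fun h => ⟨hesub x h, h⟩⟩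
        have hcperm : c.Perm e := (List.perm_ext_iff_of_nodup hcnodup hnd).mpr hcmem
        have hclen : c.length = m := hcperm.length_eq.trans hlen
        refine ⟨?_, by rw [← hclen]; exact hcsub.length_le⟩
        rw [pvChk_iff]
        exact ⟨c, hcsub, hclen, pvHits_congr (fun x => (hcmem x).symm) hhit'⟩
      have hmin : ∀ j < m, ((PySem.List.combinations U j).any
          (fun chosen => F.all (fun s => !(PySem.Set.inter (PySem.Set.ofList chosen) s).isEmpty))) = false := by
        intro j hj
        by_contra h
        rw [Bool.not_eq_false, pvChk_iff] at h
        obtain ⟨c, hsl, hlen, hhit⟩ := h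
        have : pvM F U [] ≤ j := by
          refine le_trans (pvM_le ⟨hsl.nodup hUnodup, ?_, by simpa using hhit⟩) (le_of_eq hlen)
          exact fun x hx => ⟨hsl.subset hx, by simp⟩
        omega
      have hA : pvALoop F U (List.range (U.length + 1)) = some ((m : Int)) := by
        rw [pvALoop_eq_find, pvFind_range (U.length + 1) m _ (by omega) hchk.1 hmin]
        rfl
      rw [hA, hB]
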